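-- pv_equiv track=rewrite | github.com/jpfcode/craps-console | craps.py | get_die_string_array
-- ===== SOURCE A (Python) =====
-- dice_displays = {
--    1: ['│       │','│   o   │','│       │'],
--    2: ['│ o     │','│       │','│     o │'],
--    3: ['│ o     │','│   o   │','│     o │'],
--    4: ['│ o   o │','│       │','│ o   o │'],
--    5: ['│ o   o │','│   o   │','│ o   o │'],
--    6: ['│ o   o │','│ o   o │','│ o   o │']
-- }
--
-- def get_die_string_array(die1, die2):
--    output_array = ['┌───────┐     ┌───────┐']
--    total = die1 + die2
--
--    for i in range(3):
--       total_string = '     '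
--       if i == 1:
--          total_string = str(total).center(5)
--       output_array.append(f"{dice_displays[die1][i]}{total_string}{dice_displays[die2][i]}")
--
--
--    output_array.append('└───────┘     └───────┘')
--    return output_array
-- ===== SOURCE B (Python) =====
-- # Procedural pip renderer: each die value maps to the set of lit cells in a
-- # 3x3 grid; rows are composed cell-by-cell instead of looked up from a string table.
-- _PIPS = {
--     1: {(1, 1)},
--     2: {(0, 0), (2, 2)},
--     3: {(0, 0), (1, 1), (2, 2)},
--     4: {(0, 0), (0, 2), (2, 0), (2, 2)},
--     5: {(0, 0), (0, 2), (1, 1), (2, 0), (2, 2)},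
--     6: {(0, 0), (1, 0), (2, 0), (0, 2), (1, 2), (2, 2)},
-- }
--
-- def _die_row(pips, i):
--     cells = ' '.join('o' if (i, c) in pips else ' ' for c in range(3))
--     return '│ ' + cells + ' │'
--
-- def get_die_string_array(die1, die2):
--     pips1, pips2 = _PIPS[die1], _PIPS[die2]
--     total = str(die1 + die2).center(5)
--     rows = []
--     for i in range(3):
--         mid = total if i == 1 else '     '
--         rows.append(_die_row(pips1, i) + mid + _die_row(pips2, i))
--     border = '┌───────┐     ┌───────┐'
--     return [border] + rows + [border.replace('┌', '└').replace('┐', '┘')]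
-- ===== Notes on version B (the rewrite author's own statement) =====
-- stated objective: idiomatic
-- what changed: Replaces the precomputed per-value row-string table with a procedural renderer: each die value maps to its set of lit pip cells in a 3x3 grid and every row is composed cell-by-cell (join over columns), with one border string reused and transformed for the bottom.
import Mathlib
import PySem

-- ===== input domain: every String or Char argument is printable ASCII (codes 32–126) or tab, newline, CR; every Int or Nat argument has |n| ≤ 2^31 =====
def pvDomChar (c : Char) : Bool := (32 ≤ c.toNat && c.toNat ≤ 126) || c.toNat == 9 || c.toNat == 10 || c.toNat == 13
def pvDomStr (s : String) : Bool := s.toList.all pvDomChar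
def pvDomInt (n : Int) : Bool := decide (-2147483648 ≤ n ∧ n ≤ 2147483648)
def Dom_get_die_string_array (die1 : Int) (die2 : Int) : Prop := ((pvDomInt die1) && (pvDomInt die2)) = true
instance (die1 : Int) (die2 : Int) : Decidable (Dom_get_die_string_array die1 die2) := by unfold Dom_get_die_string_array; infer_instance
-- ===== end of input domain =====

-- B renders each die row cell-by-cell from a pip-position set instead of A's full-row string table; same values, no speed claim.

-- hand port of str.center(5): exact for the strings it is applied to here (Python puts
-- marg//2 + marg%2 of the padding on the left when the width, 5, is odd)
def centerFive (s : String) : String :=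
  let n := s.toList.length
  if 5 ≤ n then s else
    let marg := 5 - n
    let left := marg / 2 + marg % 2
    String.ofList (List.replicate left ' ' ++ s.toList ++ List.replicate (marg - left) ' ')

-- ===== PORT A =====
def diceDisplays : PySem.Dict Int (List String) := PySem.Dict.ofList [
  (1, ["│       │","│   o   │","│       │"]),
  (2, ["│ o     │","│       │","│     o │"]),
  (3, ["│ o     │","│   o   │","│     o │"]),
  (4, ["│ o   o │","│       │","│ o   o │"]),
  (5, ["│ o   o │","│   o   │","│ o   o │"]),
  (6, ["│ o   o │","│ o   o │","│ o   o │"])]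

def get_die_string_array (die1 : Int) (die2 : Int) : List String :=
  let outputArray : List String := ["┌───────┐     ┌───────┐"]
  let total := die1 + die2
  let outputArray := (PySem.List.pyRange 0 3 1).foldl (fun acc i =>
    let totalString := if i == 1 then centerFive (PySem.Int.toStr total) else "     "
    acc ++ [(PySem.List.pyGetD (PySem.Dict.getD diceDisplays die1 []) i "") ++ totalString ++
            (PySem.List.pyGetD (PySem.Dict.getD diceDisplays die2 []) i "")]) outputArray
  outputArray ++ ["└───────┘     └───────┘"]

-- ===== PORT B =====
def pipsB : PySem.Dict Int (List (Int × Int)) := PySem.Dict.ofList [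
  (1, [(1, 1)]),
  (2, [(0, 0), (2, 2)]),
  (3, [(0, 0), (1, 1), (2, 2)]),
  (4, [(0, 0), (0, 2), (2, 0), (2, 2)]),
  (5, [(0, 0), (0, 2), (1, 1), (2, 0), (2, 2)]),
  (6, [(0, 0), (1, 0), (2, 0), (0, 2), (1, 2), (2, 2)])]

def dieRow (pips : List (Int × Int)) (i : Int) : String :=
  let cells := PySem.Str.join " "
    ((PySem.List.pyRange 0 3 1).map (fun c => if pips.contains (i, c) then "o" else " "))
  "│ " ++ cells ++ " │"

def get_die_string_array_alt (die1 : Int) (die2 : Int) : List String :=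
  let pips1 := PySem.Dict.getD pipsB die1 []
  let pips2 := PySem.Dict.getD pipsB die2 []
  let total := centerFive (PySem.Int.toStr (die1 + die2))
  let rows := (PySem.List.pyRange 0 3 1).map (fun i =>
    dieRow pips1 i ++ (if i == 1 then total else "     ") ++ dieRow pips2 i)
  let border := "┌───────┐     ┌───────┐"
  [border] ++ rows ++ [PySem.Str.replace (PySem.Str.replace border "┌" "└") "┐" "┘"]

-- ===== PRECONDITION & SPEC =====
-- Pre_ excludes exactly the die values outside 1..6, on which A's dict lookup raises KeyError.
def Pre_get_die_string_array (die1 : Int) (die2 : Int) : Prop :=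
  1 ≤ die1 ∧ die1 ≤ 6 ∧ 1 ≤ die2 ∧ die2 ≤ 6
instance (die1 : Int) (die2 : Int) : Decidable (Pre_get_die_string_array die1 die2) := by
  unfold Pre_get_die_string_array; infer_instance
def pvWitness_get_die_string_array : Int × Int := (3, 4)

def Spec_get_die_string_array (die1 : Int) (die2 : Int) (out : List String) : Prop := out = get_die_string_array_alt die1 die2
instance (die1 : Int) (die2 : Int) (out : List String) : Decidable (Spec_get_die_string_array die1 die2 out) := by unfold Spec_get_die_string_array; infer_instance

-- ===== CLAIM (what is proved, stated in full; the proofs are below) =====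
def Claim_equal_get_die_string_array : Prop := ∀ (die1 : Int) (die2 : Int), Dom_get_die_string_array die1 die2 → Pre_get_die_string_array die1 die2 → Spec_get_die_string_array die1 die2 (get_die_string_array die1 die2)

-- ===== LEMMAS AND PROOFS =====

-- ===== VERDICT (by name: the statement is the Claim_ definition above) =====
set_option maxHeartbeats 4000000 in
theorem get_die_string_array_spec : Claim_equal_get_die_string_array := by
  intro die1 die2 _ hPre
  obtain ⟨h1, h2, h3, h4⟩ := hPre
  unfold Spec_get_die_string_array
  interval_cases die1 <;> interval_cases die2 <;> decide
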